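-- pv_equiv track=rewrite | github.com/drrobot333/ADAM | Adam/module_utils.py | generate_next_key
-- ===== SOURCE A (Python) =====
-- def generate_next_key(current_key):
--     if current_key[-1] != 'z':
--         return current_key[:-1] + chr(ord(current_key[-1]) + 1)
--     else:
--         if current_key == 'z':
--             return 'aa'
--         else:
--             return generate_next_key(current_key[:-1]) + 'a'
-- ===== SOURCE B (Python) =====
-- def generate_next_key(current_key):
--     chars = list(current_key)
--     i = len(chars) - 1
--     while i >= 0 and chars[i] == 'z':
--         chars[i] = 'a'
--         i -= 1
--     if i < 0:
--         return 'a' + ''.join(chars)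
--     chars[i] = chr(ord(chars[i]) + 1)
--     return ''.join(chars)
-- ===== Notes on version B (the rewrite author's own statement) =====
-- stated objective: idiomatic
-- what changed: Replaces A's recursion (which rebuilds suffixes with repeated slicing and string concatenation) by a single right-to-left iterative odometer scan over a char list.
import Mathlib
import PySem

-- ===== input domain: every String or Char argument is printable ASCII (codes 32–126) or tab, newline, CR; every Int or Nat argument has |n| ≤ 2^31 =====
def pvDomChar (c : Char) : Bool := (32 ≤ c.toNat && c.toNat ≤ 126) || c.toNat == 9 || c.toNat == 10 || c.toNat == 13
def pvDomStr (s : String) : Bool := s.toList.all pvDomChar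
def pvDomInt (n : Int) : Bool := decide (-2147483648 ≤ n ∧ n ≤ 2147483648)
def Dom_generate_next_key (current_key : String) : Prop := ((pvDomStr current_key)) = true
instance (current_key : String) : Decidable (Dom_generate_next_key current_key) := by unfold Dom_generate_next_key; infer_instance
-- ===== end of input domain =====

-- B replaces A's slice-and-recurse successor by a single right-to-left odometer scan (idiomatic; return value only).

-- ===== PORT A =====
-- A's recursion over current_key[:-1]; on the empty string Python raises IndexError
-- (excluded by Pre_ below); there the port returns "".
def genA (l : List Char) : List Char :=
  match _h : l.getLast? with
  | none => []  -- A raises IndexError here (empty input); arbitrary, outside Pre_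
  | some c =>
    if c ≠ 'z' then l.dropLast ++ [Char.ofNat (c.toNat + 1)]
    else if l = ['z'] then ['a', 'a']
    else genA l.dropLast ++ ['a']
termination_by l.length
decreasing_by
  have hne : l ≠ [] := by intro hnil; simp [hnil] at _h
  have h1 : l.length ≠ 0 := by simpa using hne
  simp only [List.length_dropLast]; omega

def generate_next_key (current_key : String) : String :=
  String.ofList (genA current_key.toList)

-- ===== PORT B =====
-- B's while loop scans from the rightmost index while the char is 'z': recursion on the
-- reversed char list (the same right-to-left traversal and the same state).
def bumpRev : List Char → List Char
  | [] => ['a']                         -- index fell below 0: all chars were 'z' (or empty)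
  | c :: rest =>
    if c = 'z' then 'a' :: bumpRev rest
    else Char.ofNat (c.toNat + 1) :: rest

def generate_next_key_alt (current_key : String) : String :=
  String.ofList (bumpRev current_key.toList.reverse).reverse

-- ===== PRECONDITION & SPEC =====
-- Pre_ excludes only the empty string, on which A raises IndexError (current_key[-1]).
def Pre_generate_next_key (current_key : String) : Prop := current_key ≠ ""
instance (current_key : String) : Decidable (Pre_generate_next_key current_key) := by
  unfold Pre_generate_next_key; infer_instance
def pvWitness_generate_next_key : String := "abz"

def Spec_generate_next_key (current_key : String) (out : String) : Prop :=
  out = generate_next_key_alt current_key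
instance (current_key : String) (out : String) : Decidable (Spec_generate_next_key current_key out) := by
  unfold Spec_generate_next_key; infer_instance

-- ===== CLAIM (what is proved, stated in full; the proofs are below) =====
def Claim_equal_generate_next_key : Prop :=
  ∀ (current_key : String), Dom_generate_next_key current_key →
    Pre_generate_next_key current_key →
    Spec_generate_next_key current_key (generate_next_key current_key)

-- ===== LEMMAS AND PROOFS =====
theorem genA_concat (l : List Char) (c : Char) :
    genA (l ++ [c]) = if c ≠ 'z' then l ++ [Char.ofNat (c.toNat + 1)]
      else if l ++ [c] = ['z'] then ['a', 'a'] else genA l ++ ['a'] := by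
  rw [genA]
  split
  next heq => simp at heq
  next c' heq =>
    rw [List.getLast?_concat] at heq
    cases heq
    simp only [List.dropLast_concat]

theorem genA_eq_bumpRev (r : List Char) (h : r ≠ []) :
    genA r.reverse = (bumpRev r).reverse := by
  induction r with
  | nil => exact absurd rfl h
  | cons c rest ih =>
    rw [List.reverse_cons, genA_concat]
    by_cases hz : c = 'z'
    · subst hz
      cases rest with
      | nil => simp [bumpRev]
      | cons d ds =>
        have hne : (d :: ds).reverse ++ ['z'] ≠ ['z'] := by
          intro heq
          have := congrArg List.length heq
          simp at this
        rw [if_neg (by simp), if_neg hne, ih (by simp)]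
        simp [bumpRev]
    · simp [hz, bumpRev]

-- ===== VERDICT (by name: the statement is the Claim_ definition above) =====
theorem generate_next_key_spec : Claim_equal_generate_next_key := by
  intro s _ hpre
  have hl : s.toList.reverse ≠ [] := by
    simp only [ne_eq, List.reverse_eq_nil_iff, String.toList_eq_nil_iff]
    exact hpre
  unfold Spec_generate_next_key generate_next_key generate_next_key_alt
  rw [show s.toList = s.toList.reverse.reverse by simp, genA_eq_bumpRev _ hl]
  simp
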